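-- pv_equiv track=rewrite | github.com/dhuruvapriyan/plastyfitting | NEURON_code/run_basis_pair.py | generate_basis_configs
-- ===== SOURCE A (Python) =====
-- def generate_basis_configs(synapse_count):
--     configs = []
--     # 1. Baseline: All 0s
--     configs.append([0] * synapse_count)
--     # 2. Single Potentiation
--     for i in range(synapse_count):
--         c = [0] * synapse_count
--         c[i] = 1
--         configs.append(c)
--     # 3. Maximum: All 1s
--     configs.append([1] * synapse_count)
--     return [','.join(map(str, c)) for c in configs]
-- ===== SOURCE B (Python) =====
-- def generate_basis_configs(synapse_count):
--     base = ','.join(['0'] * synapse_count)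
--     configs = [base]
--     for i in range(synapse_count):
--         # each field is one char, so field i starts at string index 2*i
--         configs.append(base[:2 * i] + '1' + base[2 * i + 1:])
--     configs.append(','.join(['1'] * synapse_count))
--     return configs
-- ===== Notes on version B (the rewrite author's own statement) =====
-- stated objective: alternative
-- what changed: B renders the baseline CSV string once and derives each single-potentiation row by splicing a one into that string at the field's character offset, instead of A's list-of-int-lists intermediate with a per-row mutation and a final join pass over every row.
import Mathlib
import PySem

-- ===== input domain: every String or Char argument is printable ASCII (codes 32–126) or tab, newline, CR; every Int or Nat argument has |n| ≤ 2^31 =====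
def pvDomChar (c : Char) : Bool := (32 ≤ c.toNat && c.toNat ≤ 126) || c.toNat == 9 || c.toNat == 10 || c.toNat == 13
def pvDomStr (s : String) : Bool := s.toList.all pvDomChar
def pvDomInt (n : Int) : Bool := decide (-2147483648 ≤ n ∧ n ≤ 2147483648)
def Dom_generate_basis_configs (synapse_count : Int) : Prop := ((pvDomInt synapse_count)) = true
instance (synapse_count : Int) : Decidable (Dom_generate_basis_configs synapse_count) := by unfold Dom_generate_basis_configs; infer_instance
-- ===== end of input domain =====

-- B builds the baseline CSV string once and derives each single-potentiation row by splicing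
-- a '1' into it at the field's character offset, instead of A's list-of-lists plus a final join pass (objective: alternative).

-- ===== PORT A =====
def generate_basis_configs (synapse_count : Int) : List String :=
  let configs : List (List Int) := []
  -- configs.append([0] * synapse_count)
  let configs := configs ++ [PySem.List.pyRepeat [0] synapse_count]
  -- for i in range(synapse_count): c = [0]*synapse_count; c[i] = 1; configs.append(c)
  let configs := (PySem.List.pyRange 0 synapse_count 1).foldl (fun cfgs i =>
      let c := PySem.List.pyRepeat [0] synapse_count
      let c := PySem.List.pySetD c i 1   -- c[i] = 1 (i ∈ range(synapse_count) is always a valid index)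
      cfgs ++ [c]) configs
  -- configs.append([1] * synapse_count)
  let configs := configs ++ [PySem.List.pyRepeat [1] synapse_count]
  configs.map (fun c => PySem.Str.join "," (c.map PySem.Int.toStr))

-- ===== PORT B =====
def generate_basis_configs_alt (synapse_count : Int) : List String :=
  let base := PySem.Str.join "," (PySem.List.pyRepeat ["0"] synapse_count)
  let configs : List String := [base]
  let configs := (PySem.List.pyRange 0 synapse_count 1).foldl (fun acc i =>
      -- base[:2*i] + '1' + base[2*i+1:], ported exactly on code points
      -- (Lean's own String.append is opaque to the kernel, so the three-part concatenation
      --  is assembled as a List Char and re-packed with String.ofList)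
      acc ++ [String.ofList (PySem.Chars.slice base.toList none (some (2 * i)) ++
                '1' :: PySem.Chars.slice base.toList (some (2 * i + 1)) none)]) configs
  configs ++ [PySem.Str.join "," (PySem.List.pyRepeat ["1"] synapse_count)]

-- ===== PRECONDITION & SPEC =====
def Spec_generate_basis_configs (synapse_count : Int) (out : List String) : Prop := out = generate_basis_configs_alt synapse_count
instance (synapse_count : Int) (out : List String) : Decidable (Spec_generate_basis_configs synapse_count out) := by unfold Spec_generate_basis_configs; infer_instance

-- ===== CLAIM (what is proved, stated in full; the proofs are below) =====
def Claim_equal_generate_basis_configs : Prop := ∀ (synapse_count : Int), Dom_generate_basis_configs synapse_count → Spec_generate_basis_configs synapse_count (generate_basis_configs synapse_count)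

-- ===== LEMMAS AND PROOFS =====

theorem str_eq_of_toList (s t : String) (h : s.toList = t.toList) : s = t := by
  have := congrArg String.ofList h
  simpa using this

-- Core surgery fact at the char level: joining singleton fields with ',' puts field k at
-- string index 2*k, so setting field k equals splicing the character in at 2*k.
theorem join_set_surgery (c : Char) : ∀ (cs : List Char) (k : Nat), k < cs.length →
    PySem.Chars.join [','] ((cs.set k c).map (fun a => [a])) =
      (PySem.Chars.join [','] (cs.map (fun a => [a]))).take (2 * k) ++
        c :: (PySem.Chars.join [','] (cs.map (fun a => [a]))).drop (2 * k + 1) := by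
  intro cs
  induction cs with
  | nil => intro k hk; simp at hk
  | cons a tl ih =>
    intro k hk
    cases tl with
    | nil =>
      cases k with
      | zero => simp [PySem.Chars.join_singleton]
      | succ j => simp at hk
    | cons b rest =>
      cases k with
      | zero =>
        simp only [List.set_cons_zero, List.map_cons, PySem.Chars.join_cons_cons]
        simp
      | succ j =>
        have hj : j < (b :: rest).length := by simpa using hk
        have hih := ih j hj
        obtain ⟨y, ys, hys⟩ : ∃ y ys, (b :: rest).set j c = y :: ys := by
          cases j with
          | zero => exact ⟨c, rest, rfl⟩
          | succ j' => exact ⟨b, rest.set j' c, rfl⟩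
        rw [List.set_cons_succ, hys]
        rw [hys] at hih
        have h2 : 2 * (j + 1) = 2 * j + 1 + 1 := by omega
        rw [h2]
        simp only [List.map_cons] at hih ⊢
        rw [PySem.Chars.join_cons_cons, hih]
        simp [PySem.Chars.join_cons_cons, List.take_succ_cons, List.drop_succ_cons]

theorem head_eq (n : Int) :
    PySem.Str.join "," ((PySem.List.pyRepeat [(0 : Int)] n).map PySem.Int.toStr) =
      PySem.Str.join "," (PySem.List.pyRepeat ["0"] n) := by
  simp [PySem.List.pyRepeat_singleton, List.map_replicate]
  rfl

theorem last_eq (n : Int) :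
    PySem.Str.join "," ((PySem.List.pyRepeat [(1 : Int)] n).map PySem.Int.toStr) =
      PySem.Str.join "," (PySem.List.pyRepeat ["1"] n) := by
  simp [PySem.List.pyRepeat_singleton, List.map_replicate]
  rfl

theorem mapstr_set (m k : Nat) :
    ((List.replicate m (0 : Int)).set k 1).map (fun z => (PySem.Int.toStr z).toList) =
      ((List.replicate m '0').set k '1').map (fun a => [a]) := by
  rw [List.map_set, List.map_set, List.map_replicate, List.map_replicate]
  have h0 : (PySem.Int.toStr (0 : Int)).toList = ['0'] := by decide
  have h1 : (PySem.Int.toStr (1 : Int)).toList = ['1'] := by decide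
  rw [h0, h1]

theorem mid_eq (n i : Int) (h0 : 0 ≤ i) (h1 : i < n) :
    PySem.Str.join "," ((PySem.List.pySetD (PySem.List.pyRepeat [(0 : Int)] n) i 1).map PySem.Int.toStr) =
      String.ofList (PySem.Chars.slice (PySem.Str.join "," (PySem.List.pyRepeat ["0"] n)).toList none (some (2 * i)) ++
        '1' :: PySem.Chars.slice (PySem.Str.join "," (PySem.List.pyRepeat ["0"] n)).toList (some (2 * i + 1)) none) := by
  have hk : i.toNat < n.toNat := by omega
  have hcomma : (",").toList = [','] := by decide
  have hzero : ("0").toList = ['0'] := by decide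
  have hone : ("1").toList = ['1'] := by decide
  have hbase : (PySem.Str.join "," (PySem.List.pyRepeat ["0"] n)).toList
      = PySem.Chars.join [','] ((List.replicate n.toNat '0').map (fun a => [a])) := by
    rw [PySem.Str.toList_join, PySem.List.pyRepeat_singleton, hcomma, List.map_replicate, hzero,
      List.map_replicate]
  apply str_eq_of_toList
  have hlhs : (PySem.Str.join "," ((PySem.List.pySetD (PySem.List.pyRepeat [(0 : Int)] n) i 1).map PySem.Int.toStr)).toList
      = PySem.Chars.join [','] (((List.replicate n.toNat '0').set i.toNat '1').map (fun a => [a])) := by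
    conv_lhs => rw [show i = ((i.toNat : Nat) : Int) from by omega]
    rw [PySem.Str.toList_join, PySem.List.pyRepeat_singleton, PySem.List.pySetD_natCast,
      hcomma, List.map_map]
    exact congrArg _ (mapstr_set n.toNat i.toNat)
  rw [hlhs]
  have hof : (String.ofList (PySem.Chars.slice (PySem.Str.join "," (PySem.List.pyRepeat ["0"] n)).toList none (some (2 * i)) ++
        '1' :: PySem.Chars.slice (PySem.Str.join "," (PySem.List.pyRepeat ["0"] n)).toList (some (2 * i + 1)) none)).toList
      = PySem.Chars.slice (PySem.Str.join "," (PySem.List.pyRepeat ["0"] n)).toList none (some (2 * i)) ++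
        '1' :: PySem.Chars.slice (PySem.Str.join "," (PySem.List.pyRepeat ["0"] n)).toList (some (2 * i + 1)) none := by
    exact String.toList_ofList
  rw [hof, hbase]
  have e1 : PySem.Chars.slice (PySem.Chars.join [','] ((List.replicate n.toNat '0').map (fun a => [a]))) none (some (2 * i))
      = (PySem.Chars.join [','] ((List.replicate n.toNat '0').map (fun a => [a]))).take (2 * i.toNat) := by
    rw [PySem.Chars.slice_eq_listSlice, show (2 * i) = ((2 * i.toNat : Nat) : Int) from by omega,
      PySem.List.slice_to_natCast]
  have e2 : PySem.Chars.slice (PySem.Chars.join [','] ((List.replicate n.toNat '0').map (fun a => [a]))) (some (2 * i + 1)) none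
      = (PySem.Chars.join [','] ((List.replicate n.toNat '0').map (fun a => [a]))).drop (2 * i.toNat + 1) := by
    rw [PySem.Chars.slice_eq_listSlice, show (2 * i + 1) = ((2 * i.toNat + 1 : Nat) : Int) from by omega,
      PySem.List.slice_from_natCast]
  rw [e1, e2]
  exact join_set_surgery '1' (List.replicate n.toNat '0') i.toNat (by simpa using hk)

-- ===== VERDICT (by name: the statement is the Claim_ definition above) =====
theorem generate_basis_configs_spec : Claim_equal_generate_basis_configs := by
  intro n _
  unfold Spec_generate_basis_configs generate_basis_configs generate_basis_configs_alt
  simp only [PySem.List.foldl_append_singleton_eq_map, List.nil_append, List.map_append,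
    List.map_map, List.map_cons, List.map_nil, List.cons_append]
  refine congrArg₂ _ (head_eq n) (congrArg₂ _ ?_ (congrArg (fun s => [s]) (last_eq n)))
  refine List.map_congr_left ?_
  intro i hi
  have hmem := (PySem.List.mem_pyRange_one).mp hi
  exact mid_eq n i hmem.1 hmem.2
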